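-- pv_equiv track=rewrite | github.com/code10086web/interview_test | 图达通/problem_2.py | find_stone_pair
-- ===== SOURCE A (Python) =====
-- def find_stone_pair(stones, d):
--     # 创建哈希表来存储石头的重量
--     weights = {}
--
--     # 遍历所有石头
--     for stone in stones:
--         # 检查哈希表中是否存在一个石头的重量等于当前石头的重量加上D或者减去D
--         if stone + d in weights:
--             return (stone, stone + d)
--         elif stone - d in weights:
--             return (stone - d, stone)
--
--         # 把当前石头的重量添加到哈希表中
--         weights[stone] = True
--
--     # 没有找到符合条件的一对石头
--     return None
-- ===== SOURCE B (Python) =====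
-- def find_stone_pair(stones, d):
--     # Staged passes: (1) build the first-occurrence index of every weight once,
--     # (2) pick the smallest index whose weight has a d-partner at a strictly
--     # earlier index, (3) reconstruct the pair.  "seen before position i" is
--     # exactly "first occurrence index < i", so no incremental seen-set is kept.
--     first = {}
--     for i, s in enumerate(stones):
--         if s not in first:
--             first[s] = i
--     n = len(stones)
--     i = min((i for i, s in enumerate(stones)
--              if first.get(s + d, n) < i or first.get(s - d, n) < i),
--             default=None)
--     if i is None:
--         return None
--     s = stones[i]
--     if first.get(s + d, n) < i:
--         return (s, s + d)
--     return (s - d, s)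
-- ===== Notes on version B (the rewrite author's own statement) =====
-- stated objective: alternative
-- what changed: Replaces the single incremental seen-set pass (insert-as-you-scan with early return) by three staged passes: build a first-occurrence index map once over the whole list, select the minimal qualifying index with min() over a filtered enumeration, then reconstruct the pair from that index.
import Mathlib
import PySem

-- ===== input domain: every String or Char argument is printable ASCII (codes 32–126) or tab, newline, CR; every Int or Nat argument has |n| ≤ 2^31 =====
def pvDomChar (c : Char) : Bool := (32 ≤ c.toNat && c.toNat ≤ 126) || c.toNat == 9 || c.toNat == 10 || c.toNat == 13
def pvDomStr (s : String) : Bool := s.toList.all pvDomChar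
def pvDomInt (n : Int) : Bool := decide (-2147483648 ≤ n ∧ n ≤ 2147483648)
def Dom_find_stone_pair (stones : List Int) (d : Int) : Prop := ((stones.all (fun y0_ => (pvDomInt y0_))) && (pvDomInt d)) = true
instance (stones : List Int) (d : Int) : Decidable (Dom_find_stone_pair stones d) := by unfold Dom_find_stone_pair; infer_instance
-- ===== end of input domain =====

-- B replaces A's incremental seen-set pass by staged passes: a first-occurrence index map built once, a min() over a filtered enumeration, then pair reconstruction (alternative decomposition, same return value).


-- ===== PORT A =====
-- loop over stones carrying the dict 'weights'; 'x in weights' is Dict.contains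
def findStoneGoA (d : Int) (weights : PySem.Dict Int Bool) : List Int → Option (Int × Int)
  | [] => none
  | stone :: rest =>
    if weights.contains (stone + d) then some (stone, stone + d)
    else if weights.contains (stone - d) then some (stone - d, stone)
    else findStoneGoA d (weights.insert stone true) rest

def find_stone_pair (stones : List Int) (d : Int) : Option (Int × Int) :=
  findStoneGoA d PySem.Dict.empty stones

-- ===== PORT B =====
-- pass 1: first[s] = first-occurrence index of s  (for i, s in enumerate(stones): if s not in first: first[s] = i)
def findStoneFirstB (stones : List Int) : PySem.Dict Int Int :=
  (PySem.List.enumerate stones).foldl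
    (fun f p => if f.contains p.2 then f else f.insert p.2 p.1)
    PySem.Dict.empty

-- pass 2: min over the filtered enumeration; pass 3: reconstruct the pair from the chosen index
def find_stone_pair_alt (stones : List Int) (d : Int) : Option (Int × Int) :=
  let first := findStoneFirstB stones
  let n : Int := PySem.List.len stones
  match (((PySem.List.enumerate stones).filter
      (fun p => decide (first.getD (p.2 + d) n < p.1) || decide (first.getD (p.2 - d) n < p.1))).map
      (fun p => p.1)).min? with
  | none => none
  | some i =>
    let s := PySem.List.pyGetD stones i 0
    if first.getD (s + d) n < i then some (s, s + d) else some (s - d, s)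

-- ===== PRECONDITION & SPEC =====
def Spec_find_stone_pair (stones : List Int) (d : Int) (out : Option (Int × Int)) : Prop := out = find_stone_pair_alt stones d
instance (stones : List Int) (d : Int) (out : Option (Int × Int)) : Decidable (Spec_find_stone_pair stones d out) := by unfold Spec_find_stone_pair; infer_instance

-- ===== CLAIM (what is proved, stated in full; the proofs are below) =====
def Claim_equal_find_stone_pair : Prop := ∀ (stones : List Int) (d : Int), Dom_find_stone_pair stones d → Spec_find_stone_pair stones d (find_stone_pair stones d)

-- ===== LEMMAS AND PROOFS =====

-- common reference: A's loop with the dict replaced by the processed prefix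
def refGo (d : Int) (pre : List Int) : List Int → Option (Int × Int)
  | [] => none
  | s :: rest =>
    if pre.contains (s + d) then some (s, s + d)
    else if pre.contains (s - d) then some (s - d, s)
    else refGo d (pre ++ [s]) rest

-- A's dict-as-set loop equals the prefix reference
theorem goA_eq_ref (d : Int) (l : List Int) : ∀ (pre : List Int) (w : PySem.Dict Int Bool),
    (∀ x : Int, w.contains x = pre.contains x) →
    findStoneGoA d w l = refGo d pre l := by
  induction l with
  | nil => intro pre w _; rfl
  | cons s rest ih =>
    intro pre w hw
    rw [findStoneGoA, refGo, hw, hw]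
    by_cases h1 : (s + d) ∈ pre
    · simp [h1]
    · by_cases h2 : (s - d) ∈ pre
      · simp [h1, h2]
      · simp only [List.contains_eq_mem, h1, h2, decide_false, Bool.false_eq_true,
          if_false]
        apply ih
        intro x
        rw [PySem.Dict.contains_insert, hw]
        by_cases hxs : x = s <;> simp [hxs]

-- the first-occurrence dict: getD with default = the list length is idxOf (as Int)
theorem build_getD (l : List Int) : ∀ (k : Int) (f : PySem.Dict Int Int) (x D : Int),
    ((PySem.List.enumerate l k).foldl
      (fun f p => if f.contains p.2 then f else f.insert p.2 p.1) f).getD x D =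
    match f.get? x with
    | some v => v
    | none => if x ∈ l then k + (l.idxOf x : Int) else D := by
  induction l with
  | nil => intro k f x D; cases h : f.get? x <;>
      simp [PySem.List.enumerate_nil, PySem.Dict.getD_eq_get?_getD, h]
  | cons a t ih =>
    intro k f x D
    rw [PySem.List.enumerate_cons, List.foldl_cons]
    by_cases hca : f.contains a = true
    · rw [if_pos hca, ih]
      cases hfx : f.get? x with
      | none =>
        have hxa : x ≠ a := by
          intro h; subst h
          rw [PySem.Dict.contains_eq_isSome_get?, hfx] at hca; simp at hca
        have hax : (a == x) = false := beq_eq_false_iff_ne.mpr (Ne.symm hxa)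
        simp only [List.mem_cons, hxa, false_or, List.idxOf_cons, hax, cond_false]
        by_cases hxt : x ∈ t
        · simp only [hxt, if_true]; push_cast; ring
        · simp [hxt]
      | some v => rfl
    · rw [if_neg hca, ih]
      by_cases hxa : x = a
      · subst hxa
        rw [PySem.Dict.get?_insert_self]
        have hfx : f.get? x = none := by
          rw [PySem.Dict.get?_eq_none_iff_contains]; simpa using hca
        simp [hfx]
      · rw [PySem.Dict.get?_insert_of_ne _ _ hxa]
        cases hfx : f.get? x with
        | none =>
          have hax : (a == x) = false := beq_eq_false_iff_ne.mpr (Ne.symm hxa)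
          simp only [List.mem_cons, hxa, false_or, List.idxOf_cons, hax, cond_false]
          by_cases hxt : x ∈ t
          · simp only [hxt, if_true]; push_cast; ring
          · simp [hxt]
        | some v => rfl

theorem first_getD (stones : List Int) (x : Int) :
    (findStoneFirstB stones).getD x (PySem.List.len stones) = (stones.idxOf x : Int) := by
  unfold findStoneFirstB
  rw [build_getD stones 0 PySem.Dict.empty x]
  simp only [PySem.Dict.get?_empty]
  by_cases hx : x ∈ stones
  · simp [hx]
  · simp [hx, PySem.List.len_eq]

-- idxOf < i ↔ membership in the prefix before i
theorem idxOf_lt_iff_mem_take (l : List Int) (x : Int) (i : Nat) (hi : i ≤ l.length) :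
    ((l.idxOf x : Int) < (i : Int)) ↔ x ∈ l.take i := by
  by_cases hx : x ∈ l
  · rw [List.mem_take_iff_idxOf_lt hx]; exact_mod_cast Iff.rfl
  · constructor
    · intro h
      exfalso
      rw [List.idxOf_eq_length_iff.mpr hx] at h
      omega
    · intro h
      exact absurd (List.mem_of_mem_take h) hx

-- min? of a ≤-pairwise list is its head
theorem foldl_min_eq (t : List Int) : ∀ (a : Int), (∀ x ∈ t, a ≤ x) → t.foldl min a = a := by
  induction t with
  | nil => intro a _; rfl
  | cons b u ih =>
    intro a h
    rw [List.foldl_cons, min_eq_left (h b (by simp))]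
    exact ih a (fun x hx => h x (List.mem_cons_of_mem _ hx))

theorem min?_eq_head?_of_pairwise (l : List Int) (h : l.Pairwise (· ≤ ·)) :
    l.min? = l.head? := by
  cases l with
  | nil => rfl
  | cons a t =>
    rw [List.min?_cons', List.head?_cons, foldl_min_eq t a (List.pairwise_cons.mp h).1]

-- the reference loop equals B's staged selection (condition stated via idxOf)
theorem getD_append_length (pre : List Int) (s : Int) (suf : List Int) :
    (pre ++ s :: suf).getD pre.length 0 = s := by
  induction pre with
  | nil => rfl
  | cons a p ihp => simp only [List.cons_append, List.length_cons, List.getD_cons_succ]; exact ihp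

theorem ref_eq_sel (stones : List Int) (d : Int) : ∀ (l pre : List Int), pre ++ l = stones →
    refGo d pre l =
      match (((PySem.List.enumerate l (pre.length : Int)).filter
          (fun p => decide ((stones.idxOf (p.2 + d) : Int) < p.1) ||
                    decide ((stones.idxOf (p.2 - d) : Int) < p.1))).map (fun p => p.1)).head? with
      | none => none
      | some i =>
        let s := PySem.List.pyGetD stones i 0
        if (stones.idxOf (s + d) : Int) < i then some (s, s + d) else some (s - d, s) := by
  intro l
  induction l with
  | nil => intro pre _; rfl
  | cons s rest ih =>
    intro pre hpre
    have hlen : pre.length ≤ stones.length := by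
      rw [← hpre]; simp
    have htake : stones.take pre.length = pre := by
      rw [← hpre, List.take_left]
    have hplus : ((stones.idxOf (s + d) : Int) < (pre.length : Int)) ↔ (s + d) ∈ pre := by
      rw [idxOf_lt_iff_mem_take stones (s + d) pre.length hlen, htake]
    have hminus : ((stones.idxOf (s - d) : Int) < (pre.length : Int)) ↔ (s - d) ∈ pre := by
      rw [idxOf_lt_iff_mem_take stones (s - d) pre.length hlen, htake]
    rw [refGo, PySem.List.enumerate_cons, List.filter_cons]
    by_cases h1 : (s + d) ∈ pre
    · have hc : (decide ((stones.idxOf (s + d) : Int) < (pre.length : Int)) ||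
          decide ((stones.idxOf (s - d) : Int) < (pre.length : Int))) = true := by
        simp [hplus.mpr h1]
      simp only [hc, if_true, List.map_cons, List.head?_cons]
      have hs : PySem.List.pyGetD stones (pre.length : Int) 0 = s := by
        rw [← hpre, PySem.List.pyGetD_natCast]
        exact getD_append_length pre s rest
      rw [hs]
      simp [hplus.mpr h1, h1]
    · by_cases h2 : (s - d) ∈ pre
      · have hc : (decide ((stones.idxOf (s + d) : Int) < (pre.length : Int)) ||
            decide ((stones.idxOf (s - d) : Int) < (pre.length : Int))) = true := by
          simp [hminus.mpr h2]
        simp only [hc, if_true, List.map_cons, List.head?_cons]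
        have hs : PySem.List.pyGetD stones (pre.length : Int) 0 = s := by
          rw [← hpre, PySem.List.pyGetD_natCast]
          exact getD_append_length pre s rest
        rw [hs]
        have hnp : ¬ ((stones.idxOf (s + d) : Int) < (pre.length : Int)) := by
          rw [hplus]; exact h1
        simp [hnp, h1, h2]
      · have hc : (decide ((stones.idxOf (s + d) : Int) < (pre.length : Int)) ||
            decide ((stones.idxOf (s - d) : Int) < (pre.length : Int))) = false := by
          simp [hplus, hminus, h1, h2]
        simp only [hc]
        have hrec := ih (pre ++ [s]) (by simpa using hpre)
        simp only [h1, h2, Bool.false_eq_true, if_false, List.contains_eq_mem,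
          decide_eq_true_eq] at *
        rw [hrec]
        have : ((pre ++ [s]).length : Int) = (pre.length : Int) + 1 := by
          simp
        rw [this]

-- ===== VERDICT (by name: the statement is the Claim_ definition above) =====
theorem find_stone_pair_spec : Claim_equal_find_stone_pair := by
  intro stones d _
  unfold Spec_find_stone_pair find_stone_pair find_stone_pair_alt
  rw [goA_eq_ref d stones [] PySem.Dict.empty (by intro x; simp)]
  simp only [first_getD]
  have hpair : ((((PySem.List.enumerate stones 0).filter
      (fun p => decide ((stones.idxOf (p.2 + d) : Int) < p.1) ||
                decide ((stones.idxOf (p.2 - d) : Int) < p.1))).map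
      (fun p => p.1)).Pairwise (· ≤ ·)) := by
    rw [List.pairwise_map]
    exact ((PySem.List.pairwise_lt_enumerate stones 0).filter _).imp (fun h => le_of_lt h)
  rw [min?_eq_head?_of_pairwise _ hpair]
  have := ref_eq_sel stones d stones [] rfl
  simpa using this
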